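-- pv_equiv track=rewrite | github.com/ichiro-ss/atcoder_typical_90 | 067_b89.py | eight_nine
-- ===== SOURCE A (Python) =====
-- def eight_nine(x8):
--     # 8 to 10
--     x10 = 0
--     i = 1
--     while x8 > 0:
--         x10 += (x8 % 10) * i
--         i *= 8
--         x8 //= 10
--
--     # 10 to 9
--     x9 = 0
--     i = 1
--     while x10 > 0:
--         x9 += 5 * i if x10 % 9 == 8 else (x10 % 9) * i  # if fig 8, change it to 5
--         i *= 10
--         x10 //= 9
--
--     return x9
-- ===== SOURCE B (Python) =====
-- def eight_nine(x8):
--     # MSB-first recursive Horner in both directions: no accumulator/multiplier state.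
--     def to_val(n):
--         return 0 if n <= 0 else to_val(n // 10) * 8 + n % 10
--
--     def to_base9(v):
--         if v <= 0:
--             return 0
--         d = v % 9
--         return to_base9(v // 9) * 10 + (5 if d == 8 else d)
--
--     return to_base9(to_val(x8))
-- ===== Notes on version B (the rewrite author's own statement) =====
-- stated objective: simpler
-- what changed: Replaces A's two accumulator-and-place-multiplier while loops with two pure Horner-style recursions (MSB-first combination, no running multiplier state).
import Mathlib
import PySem

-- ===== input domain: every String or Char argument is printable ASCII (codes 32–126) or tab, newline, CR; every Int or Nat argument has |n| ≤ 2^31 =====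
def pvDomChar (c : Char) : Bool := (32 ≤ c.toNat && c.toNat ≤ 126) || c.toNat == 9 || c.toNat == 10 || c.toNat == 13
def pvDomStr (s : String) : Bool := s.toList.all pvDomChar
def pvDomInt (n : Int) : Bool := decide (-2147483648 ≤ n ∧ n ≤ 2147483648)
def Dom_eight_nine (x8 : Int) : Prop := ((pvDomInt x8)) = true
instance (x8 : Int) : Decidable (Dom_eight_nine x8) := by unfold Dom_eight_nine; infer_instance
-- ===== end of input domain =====

-- B replaces A's two accumulator+place-multiplier while loops by two pure Horner-style
-- recursions (MSB-first combination, no multiplier state); objective: simpler.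

-- termination helper for the while loops / recursions (Python '//' by a positive divisor)
theorem pvFdivToNatLt (n d : Int) (hn : 0 < n) (hd : (1:Int) < d) :
    (PySem.Int.floordiv n d).toNat < n.toNat := by
  rw [PySem.Int.floordiv_eq_ediv_of_pos (by omega)]
  have h2 : n / d < n := by
    rw [Int.ediv_lt_iff_lt_mul (by omega)]
    nlinarith
  have h3 := Int.ediv_nonneg (le_of_lt hn) (by omega : (0:Int) ≤ d)
  omega

-- ===== PORT A =====
-- while x8 > 0: x10 += (x8 % 10) * i; i *= 8; x8 //= 10
def eightNineLoop1 (x8 x10 i : Int) : Int :=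
  if h : x8 > 0 then
    eightNineLoop1 (PySem.Int.floordiv x8 10) (x10 + (PySem.Int.mod x8 10) * i) (i * 8)
  else x10
termination_by x8.toNat
decreasing_by exact pvFdivToNatLt x8 10 h (by norm_num)

-- while x10 > 0: x9 += (5 if x10%9==8 else x10%9) * i; i *= 10; x10 //= 9
def eightNineLoop2 (x10 x9 i : Int) : Int :=
  if h : x10 > 0 then
    eightNineLoop2 (PySem.Int.floordiv x10 9)
      (x9 + (if PySem.Int.mod x10 9 = 8 then 5 * i else (PySem.Int.mod x10 9) * i)) (i * 10)
  else x9
termination_by x10.toNat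
decreasing_by exact pvFdivToNatLt x10 9 h (by norm_num)

def eight_nine (x8 : Int) : Int :=
  eightNineLoop2 (eightNineLoop1 x8 0 1) 0 1

-- ===== PORT B =====
def bToVal (n : Int) : Int :=
  if h : n ≤ 0 then 0
  else bToVal (PySem.Int.floordiv n 10) * 8 + PySem.Int.mod n 10
termination_by n.toNat
decreasing_by exact pvFdivToNatLt n 10 (by omega) (by norm_num)

def bToBase9 (v : Int) : Int :=
  if h : v ≤ 0 then 0
  else
    bToBase9 (PySem.Int.floordiv v 9) * 10 +
      (if PySem.Int.mod v 9 = 8 then 5 else PySem.Int.mod v 9)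
termination_by v.toNat
decreasing_by exact pvFdivToNatLt v 9 (by omega) (by norm_num)

def eight_nine_alt (x8 : Int) : Int :=
  bToBase9 (bToVal x8)

-- ===== PRECONDITION & SPEC =====
def Spec_eight_nine (x8 : Int) (out : Int) : Prop := out = eight_nine_alt x8
instance (x8 : Int) (out : Int) : Decidable (Spec_eight_nine x8 out) := by unfold Spec_eight_nine; infer_instance

-- ===== CLAIM (what is proved, stated in full; the proofs are below) =====
def Claim_equal_eight_nine : Prop := ∀ (x8 : Int), Dom_eight_nine x8 → Spec_eight_nine x8 (eight_nine x8)

-- ===== LEMMAS AND PROOFS =====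

theorem loop1_eq (k : Nat) : ∀ x8 x10 i : Int, x8.toNat ≤ k →
    eightNineLoop1 x8 x10 i = x10 + i * bToVal x8 := by
  induction k with
  | zero =>
    intro x8 x10 i h
    have h0 : ¬ x8 > 0 := by omega
    rw [eightNineLoop1, bToVal]
    simp [h0, (by omega : x8 ≤ 0)]
  | succ k ih =>
    intro x8 x10 i h
    by_cases hp : x8 > 0
    · rw [eightNineLoop1, bToVal]
      rw [dif_pos hp, dif_neg (show ¬ x8 ≤ 0 by omega)]
      rw [ih _ _ _ (by have := pvFdivToNatLt x8 10 hp (by norm_num); omega)]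
      ring
    · rw [eightNineLoop1, bToVal]
      simp [hp, (by omega : x8 ≤ 0)]

theorem loop2_eq (k : Nat) : ∀ v x9 i : Int, v.toNat ≤ k →
    eightNineLoop2 v x9 i = x9 + i * bToBase9 v := by
  induction k with
  | zero =>
    intro v x9 i h
    have h0 : ¬ v > 0 := by omega
    rw [eightNineLoop2, bToBase9]
    simp [h0, (by omega : v ≤ 0)]
  | succ k ih =>
    intro v x9 i h
    by_cases hp : v > 0
    · rw [eightNineLoop2, bToBase9]
      rw [dif_pos hp, dif_neg (show ¬ v ≤ 0 by omega)]
      rw [ih _ _ _ (by have := pvFdivToNatLt v 9 hp (by norm_num); omega)]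
      split_ifs <;> ring
    · rw [eightNineLoop2, bToBase9]
      simp [hp, (by omega : v ≤ 0)]

-- ===== VERDICT (by name: the statement is the Claim_ definition above) =====
theorem eight_nine_spec : Claim_equal_eight_nine := by
  intro x8 _
  unfold Spec_eight_nine eight_nine eight_nine_alt
  rw [loop1_eq x8.toNat x8 0 1 (le_refl _), loop2_eq _ _ 0 1 (le_refl _)]
  ring
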